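-- pv_equiv track=rewrite | github.com/daniellozuz/Project-Euler | Problem215/problem215.py | cracks
-- ===== SOURCE A (Python) =====
-- def cracks(bricks):
--     '''Returns a list of crack locations, given bricks forming a level'''
--     crack_locations = []
--     location = 0
--     for brik in bricks:
--         location += brik
--         if location != sum(bricks):
--             crack_locations.append(location)
--     return crack_locations
-- ===== SOURCE B (Python) =====
-- def cracks(bricks):
--     '''Returns a list of crack locations, given bricks forming a level'''
--     total = sum(bricks)
--     out = []
--     t = 0  # sum of the bricks already seen from the right
--     for b in reversed(bricks):
--         if t != 0:
--             out.append(total - t)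
--         t += b
--     out.reverse()
--     return out
-- ===== Notes on version B (the rewrite author's own statement) =====
-- stated objective: faster
-- what changed: B walks the bricks right-to-left keeping a suffix sum (each crack is total - suffix), appending results back-to-front and reversing once, instead of A's left-to-right prefix accumulation that re-sums the whole list at every step.
import Mathlib
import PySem

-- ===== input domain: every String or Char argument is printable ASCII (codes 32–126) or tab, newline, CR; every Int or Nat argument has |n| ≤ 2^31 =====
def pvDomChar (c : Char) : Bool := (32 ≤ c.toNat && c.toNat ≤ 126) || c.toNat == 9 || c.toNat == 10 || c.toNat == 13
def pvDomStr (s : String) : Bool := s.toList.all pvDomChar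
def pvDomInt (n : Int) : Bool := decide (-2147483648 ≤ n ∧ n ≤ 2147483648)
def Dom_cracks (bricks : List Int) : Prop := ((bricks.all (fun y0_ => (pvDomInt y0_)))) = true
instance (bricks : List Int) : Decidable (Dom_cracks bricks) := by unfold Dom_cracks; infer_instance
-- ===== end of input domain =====

-- B scans right-to-left with a suffix sum and reverses once, instead of A's left-to-right loop that re-sums the list per step: asymptotically faster.

-- ===== PORT A =====
-- A: one loop keeping (crack_locations, location); sum(bricks) recomputed at every test.
def cracks (bricks : List Int) : List Int :=
  (bricks.foldl
    (fun (st : List Int × Int) brik =>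
      let location := st.2 + brik
      if location ≠ bricks.foldl (· + ·) 0 then (st.1 ++ [location], location)
      else (st.1, location))
    ([], 0)).1

-- ===== PORT B =====
-- B: total once; loop over reversed bricks with suffix sum t, emit total - t when t ≠ 0; reverse the output.
def cracks_alt (bricks : List Int) : List Int :=
  let total := bricks.foldl (· + ·) 0
  (bricks.reverse.foldl
    (fun (st : List Int × Int) b =>
      (if st.2 ≠ 0 then st.1 ++ [total - st.2] else st.1, st.2 + b))
    ([], 0)).1.reverse

-- ===== PRECONDITION & SPEC =====
def Spec_cracks (bricks : List Int) (out : List Int) : Prop := out = cracks_alt bricks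
instance (bricks : List Int) (out : List Int) : Decidable (Spec_cracks bricks out) := by unfold Spec_cracks; infer_instance

-- ===== CLAIM (what is proved, stated in full; the proofs are below) =====
def Claim_equal_cracks : Prop := ∀ (bricks : List Int), Dom_cracks bricks → Spec_cracks bricks (cracks bricks)

-- ===== LEMMAS AND PROOFS =====
-- common characterisation: running prefix sums starting from s
def cracksPrefixes (s : Int) : List Int → List Int
  | [] => []
  | b :: rest => (s + b) :: cracksPrefixes (s + b) rest

theorem cracks_loop (rest : List Int) (T : Int) :
    ∀ (acc : List Int) (loc : Int),
    (rest.foldl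
      (fun (st : List Int × Int) brik =>
        let location := st.2 + brik
        if location ≠ T then (st.1 ++ [location], location)
        else (st.1, location))
      (acc, loc)).1
    = acc ++ (cracksPrefixes loc rest).filter (fun p => p ≠ T) := by
  induction rest with
  | nil => intro acc loc; simp [cracksPrefixes]
  | cons b rest ih =>
    intro acc loc
    rw [List.foldl_cons]
    by_cases h : loc + b = T
    · have hstep : (let location := (acc, loc).2 + b
          if location ≠ T then ((acc, loc).1 ++ [location], location)
          else ((acc, loc).1, location)) = (acc, loc + b) := by
        simp [h]
      rw [hstep, ih]
      simp [cracksPrefixes, h]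
    · have hstep : (let location := (acc, loc).2 + b
          if location ≠ T then ((acc, loc).1 ++ [location], location)
          else ((acc, loc).1, location)) = (acc ++ [loc + b], loc + b) := by
        simp [h]
      rw [hstep, ih]
      simp [cracksPrefixes, h]

theorem cracks_alt_loop (T : Int) (l : List Int) :
    l.foldr
      (fun b (st : List Int × Int) =>
        (if st.2 ≠ 0 then st.1 ++ [T - st.2] else st.1, st.2 + b))
      ([], 0)
    = (((cracksPrefixes (T - l.sum) l).filter (fun p => p ≠ T)).reverse, l.sum) := by
  induction l with
  | nil => simp [cracksPrefixes]
  | cons b rest ih =>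
    rw [List.foldr_cons, ih]
    have hpref : T - (b :: rest).sum + b = T - rest.sum := by simp; ring
    by_cases h : rest.sum = 0
    · have hb : b + (T - (b + rest.sum)) = T - rest.sum := by ring
      simp [cracksPrefixes, h, add_comm]
    · have hb : b + (T - (b + rest.sum)) = T - rest.sum := by ring
      have hne : T - rest.sum ≠ T := by omega
      simp [cracksPrefixes, h, hb, hne, add_comm]

theorem foldl_add_sum : ∀ (l : List Int) (a : Int), l.foldl (· + ·) a = a + l.sum
  | [], a => by simp
  | b :: r, a => by rw [List.foldl_cons, foldl_add_sum r]; simp; ring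

-- ===== VERDICT (by name: the statement is the Claim_ definition above) =====
theorem cracks_spec : Claim_equal_cracks := by
  intro bricks _
  unfold Spec_cracks cracks cracks_alt
  have hsum : bricks.foldl (· + ·) 0 = bricks.sum := by
    rw [foldl_add_sum]; ring
  simp only [hsum, List.foldl_reverse]
  rw [cracks_alt_loop bricks.sum bricks, List.reverse_reverse]
  have h := cracks_loop bricks bricks.sum [] 0
  simp only [sub_self] at *
  simpa using h
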